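-- pv_equiv track=rewrite | github.com/errorcorrectionzoo/eczoo_data | scripts/lint/remove_trailing_block_apostrophes.py | block_scalar_header
-- ===== SOURCE A (Python) =====
-- from typing import List, Tuple
--
-- def block_scalar_header(line: str) -> Tuple[int, bool]:
--     """Return (indent, True) if line starts a YAML block scalar, else (_, False)."""
--     if not line.strip() or line.lstrip().startswith("#"):
--         return 0, False
--
--     indent = len(line) - len(line.lstrip(" "))
--     text = line.strip()
--
--     # Match "key: |", "key: >", including optional chomping/indent indicators.
--     if ":" not in text:
--         return indent, False
--
--     _, rhs = text.split(":", 1)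
--     rhs = rhs.strip()
--     if not rhs:
--         return indent, False
--
--     if rhs[0] not in "|>":
--         return indent, False
--
--     if len(rhs) > 1:
--         # Allow optional YAML modifiers after | or > (e.g., |-, >+, |2).
--         for ch in rhs[1:]:
--             if ch not in "-+0123456789":
--                 return indent, False
--
--     return indent, True
-- ===== SOURCE B (Python) =====
-- def block_scalar_header(line):
--     """Return (indent, True) if line starts a YAML block scalar, else (_, False)."""
--     stripped = line.strip()
--     if not stripped or stripped.startswith("#"):
--         return 0, False
--     indent = len(line) - len(line.lstrip(" "))
--     # One left-to-right pass over the stripped line with a 4-state automaton: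
--     # 0 = before the first colon, 1 = after it (skipping whitespace),
--     # 2 = block-scalar indicator seen (reading modifiers), 3 = rejected.
--     state = 0
--     for ch in stripped:
--         if state == 0:
--             state = 1 if ch == ":" else 0
--         elif state == 1:
--             if ch.isspace():
--                 state = 1
--             elif ch in "|>":
--                 state = 2
--             else:
--                 state = 3
--         elif state == 2:
--             state = 2 if ch in "-+0123456789" else 3
--     return indent, state == 2
-- ===== Notes on version B (the rewrite author's own statement) =====
-- stated objective: alternative
-- what changed: Replaces the split-at-first-colon, the two extra strip passes over the right-hand side and the explicit modifier loop with a single left-to-right pass over the stripped line driven by a 4-state automaton (before-colon / skipping-whitespace / reading-modifiers / rejected).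
import Mathlib
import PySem

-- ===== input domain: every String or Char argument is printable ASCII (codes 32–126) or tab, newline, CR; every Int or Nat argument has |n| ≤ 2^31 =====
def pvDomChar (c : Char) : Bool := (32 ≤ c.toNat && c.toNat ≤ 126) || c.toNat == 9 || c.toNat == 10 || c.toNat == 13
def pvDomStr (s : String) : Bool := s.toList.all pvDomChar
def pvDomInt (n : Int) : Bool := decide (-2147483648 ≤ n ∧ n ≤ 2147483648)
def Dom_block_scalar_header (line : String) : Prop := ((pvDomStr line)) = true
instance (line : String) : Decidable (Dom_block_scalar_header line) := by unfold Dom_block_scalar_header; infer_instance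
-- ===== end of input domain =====

-- B replaces the split-at-first-colon + the extra strip passes + the explicit modifier loop by a single
-- left-to-right pass of a 4-state automaton over the stripped line (alternative decomposition, same cost).

-- ===== PORT A =====
-- port of the membership test `ch in "-+0123456789"` (shared by both ports)
def isMod (ch : Char) : Bool := "-+0123456789".toList.contains ch
-- port of the membership test `ch in "|>"` (shared by both ports)
def isInd (ch : Char) : Bool := "|>".toList.contains ch

-- Python A's loop: 'for ch in rhs[1:]: if ch not in "-+0123456789": return indent, False' then 'return indent, True'
def aModLoop (indent : Int) : List Char → Int × Bool
  | [] => (indent, true)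
  | ch :: rest => if isMod ch = false then (indent, false) else aModLoop indent rest

def block_scalar_header (line : String) : Int × Bool :=
  let cs := line.toList
  if (PySem.Chars.strip cs).isEmpty || PySem.Chars.startswith (PySem.Chars.lstrip cs) ['#'] then (0, false)
  else
    -- len(line) - len(line.lstrip(" ")): hand port, exact — lstrip(" ") drops only leading spaces
    let indent : Int := (cs.length : Int) - ((cs.dropWhile (· = ' ')).length : Int)
    let text := PySem.Chars.strip cs
    if PySem.Chars.isIn [':'] text = false then (indent, false)
    else
      -- text.split(":", 1)[1]: hand port, exact because the preceding guard ensured ':' ∈ text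
      let rhs0 := (text.dropWhile (· ≠ ':')).drop 1
      let rhs := PySem.Chars.strip rhs0
      if rhs.isEmpty then (indent, false)
      else if isInd rhs.headI = false then (indent, false)  -- rhs[0]: safe, rhs is nonempty here
      else if rhs.length > 1 then aModLoop indent (rhs.drop 1)
      else (indent, true)

-- ===== PORT B =====
-- Source B's automaton: 0 = before first colon, 1 = after it skipping whitespace, 2 = indicator seen, 3 = rejected
def altStep (st : Nat) (ch : Char) : Nat :=
  if st = 0 then (if ch = ':' then 1 else 0)
  else if st = 1 then
    (if PySem.Chars.isspace ch then 1
     else if isInd ch then 2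
     else 3)
  else if st = 2 then (if isMod ch then 2 else 3)
  else 3

def block_scalar_header_alt (line : String) : Int × Bool :=
  let stripped := PySem.Chars.strip line.toList
  if stripped.isEmpty || PySem.Chars.startswith stripped ['#'] then (0, false)
  else
    -- len(line) - len(line.lstrip(" ")): hand port, exact — lstrip(" ") drops only leading spaces
    let indent : Int := (line.toList.length : Int) - ((line.toList.dropWhile (· = ' ')).length : Int)
    (indent, (stripped.foldl altStep 0) == 2)

-- ===== PRECONDITION & SPEC =====
def Spec_block_scalar_header (line : String) (out : Int × Bool) : Prop := out = block_scalar_header_alt line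
instance (line : String) (out : Int × Bool) : Decidable (Spec_block_scalar_header line out) := by unfold Spec_block_scalar_header; infer_instance

-- ===== CLAIM (what is proved, stated in full; the proofs are below) =====
def Claim_equal_block_scalar_header : Prop := ∀ (line : String), Dom_block_scalar_header line → Spec_block_scalar_header line (block_scalar_header line)

-- ===== LEMMAS AND PROOFS =====

-- "no trailing whitespace" (the invariant stripping establishes)
def NoTrailWS (l : List Char) : Prop := ∀ c, l.getLast? = some c → PySem.Chars.isspace c = false

lemma head?_dropWhile_isspace (l : List Char) (c : Char)
    (h : (l.dropWhile PySem.Chars.isspace).head? = some c) : PySem.Chars.isspace c = false := by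
  induction l with
  | nil => simp at h
  | cons a t ih =>
      cases ha : PySem.Chars.isspace a with
      | true => rw [List.dropWhile_cons, if_pos (by simp [ha])] at h; exact ih h
      | false =>
          rw [List.dropWhile_cons, if_neg (by simp [ha])] at h
          simp only [List.head?_cons, Option.some.injEq] at h
          rw [← h]; exact ha

lemma rstrip_eq_self (l : List Char) (h : NoTrailWS l) : PySem.Chars.rstrip l = l := by
  unfold PySem.Chars.rstrip
  cases hr : l.reverse with
  | nil => simp [List.reverse_eq_nil_iff.mp hr]
  | cons c r =>
      have hc : PySem.Chars.isspace c = false := by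
        apply h c; rw [← List.head?_reverse, hr]; rfl
      have hd : List.dropWhile PySem.Chars.isspace (c :: r) = c :: r := by
        rw [List.dropWhile_cons, if_neg (by simp [hc])]
      rw [hd, List.reverse_eq_iff]
      exact hr.symm

lemma noTrail_rstrip (l : List Char) : NoTrailWS (PySem.Chars.rstrip l) := by
  intro c hc
  apply head?_dropWhile_isspace l.reverse c
  rw [← List.head?_reverse] at hc
  unfold PySem.Chars.rstrip at hc
  rwa [List.reverse_reverse] at hc

lemma noTrail_strip (l : List Char) : NoTrailWS (PySem.Chars.strip l) := by
  unfold PySem.Chars.strip; exact noTrail_rstrip _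

lemma getLast?_append_right (u v : List Char) (hne : v ≠ []) :
    (u ++ v).getLast? = v.getLast? := by
  rw [← List.head?_reverse, ← List.head?_reverse, List.reverse_append]
  cases hv : v.reverse with
  | nil => exact absurd (by simpa using hv) hne
  | cons x xs => simp

lemma noTrail_append (u v : List Char) (h : NoTrailWS (u ++ v)) : NoTrailWS v := by
  intro c hc
  apply h c
  cases v with
  | nil => simp at hc
  | cons b w => rw [getLast?_append_right u _ (by simp)]; exact hc

lemma noTrail_dropWhile (p : Char → Bool) (l : List Char) (h : NoTrailWS l) :
    NoTrailWS (l.dropWhile p) := by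
  obtain ⟨u, hu⟩ := List.dropWhile_suffix (l := l) (p := p)
  exact noTrail_append u _ (by rwa [hu])

lemma rstrip_prefix (l : List Char) : PySem.Chars.rstrip l <+: l := by
  unfold PySem.Chars.rstrip
  have h := List.dropWhile_suffix (l := l.reverse) (p := PySem.Chars.isspace)
  have := (List.reverse_prefix (l₁ := (l.reverse.dropWhile PySem.Chars.isspace)) (l₂ := l.reverse)).mpr h
  rwa [List.reverse_reverse] at this

lemma foldl_altStep_three (l : List Char) : l.foldl altStep 3 = 3 := by
  induction l with
  | nil => rfl
  | cons a t ih => simpa [altStep] using ih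

lemma foldl_altStep_two (l : List Char) :
    l.foldl altStep 2 = if l.all isMod then 2 else 3 := by
  induction l with
  | nil => rfl
  | cons a t ih =>
      cases ha : isMod a with
      | true =>
          rw [List.foldl_cons]
          have h2 : altStep 2 a = 2 := by simp [altStep, ha]
          rw [h2, ih, List.all_cons, ha, Bool.true_and]
      | false =>
          rw [List.foldl_cons]
          have h3 : altStep 2 a = 3 := by simp [altStep, ha]
          rw [h3, foldl_altStep_three, List.all_cons, ha, Bool.false_and, if_neg (by simp)]

lemma foldl_altStep_zero (u : List Char) (h : ':' ∉ u) : u.foldl altStep 0 = 0 := by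
  induction u with
  | nil => rfl
  | cons a t ih =>
      have ha : a ≠ ':' := fun e => h (by simp [e])
      rw [List.foldl_cons]
      have h0 : altStep 0 a = 0 := by simp [altStep, ha]
      rw [h0]; exact ih (fun hm => h (List.mem_cons_of_mem _ hm))

lemma foldl_altStep_one_dropWhile (v : List Char) :
    v.foldl altStep 1 = (v.dropWhile PySem.Chars.isspace).foldl altStep 1 := by
  induction v with
  | nil => rfl
  | cons a t ih =>
      cases ha : PySem.Chars.isspace a with
      | true =>
          rw [List.dropWhile_cons, if_pos (by simp [ha]), List.foldl_cons]
          have h1 : altStep 1 a = 1 := by simp [altStep, ha]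
          rw [h1]; exact ih
      | false => rw [List.dropWhile_cons, if_neg (by simp [ha])]

lemma aModLoop_eq (indent : Int) (l : List Char) :
    aModLoop indent l = (indent, l.all isMod) := by
  induction l with
  | nil => rfl
  | cons a t ih =>
      cases ha : isMod a with
      | true =>
          rw [aModLoop, if_neg (by simp [ha]), ih, List.all_cons, ha, Bool.true_and]
      | false =>
          rw [aModLoop, if_pos (by rw [ha]), List.all_cons, ha, Bool.false_and]

lemma singleton_infix_iff (a : Char) (l : List Char) : [a] <:+: l ↔ a ∈ l := by
  constructor
  · intro h; exact h.sublist.mem (by simp)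
  · intro h
    obtain ⟨s, t, rfl⟩ := List.append_of_mem h
    exact ⟨s, t, by simp⟩

lemma split_colon (t : List Char) (h : ':' ∈ t) :
    t = t.takeWhile (· ≠ ':') ++ ':' :: ((t.dropWhile (· ≠ ':')).drop 1)
    ∧ ':' ∉ t.takeWhile (· ≠ ':') := by
  induction t with
  | nil => simp at h
  | cons a t ih =>
      by_cases ha : a = ':'
      · subst ha
        refine ⟨by simp, by simp⟩
      · have hm : ':' ∈ t := by
          cases h with
          | head => exact absurd rfl ha
          | tail _ h' => exact h'
        obtain ⟨h1, h2⟩ := ih hm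
        have hpa : (decide ¬(a = ':')) = true := by simp [ha]
        constructor
        · rw [List.takeWhile_cons, List.dropWhile_cons]
          simp only [ne_eq, hpa, if_true]
          rw [List.cons_append]
          exact congrArg (a :: ·) h1
        · rw [List.takeWhile_cons]
          simp only [ne_eq, hpa, if_true]
          intro hmem
          cases hmem with
          | head => exact absurd rfl ha
          | tail _ h' => exact h2 h'

-- the core: on a right-stripped tail, A's rhs logic equals the automaton run from state 1
lemma tail_eq (v : List Char) (hv : NoTrailWS v) (indent : Int) :
    (let rhs := PySem.Chars.strip v;
     if rhs.isEmpty then (indent, false)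
     else if isInd rhs.headI = false then (indent, false)
     else if rhs.length > 1 then aModLoop indent (rhs.drop 1)
     else (indent, true))
    = (indent, (v.foldl altStep 1) == 2) := by
  have hw : PySem.Chars.strip v = v.dropWhile PySem.Chars.isspace := by
    unfold PySem.Chars.strip PySem.Chars.lstrip
    exact rstrip_eq_self _ (noTrail_dropWhile _ _ hv)
  rw [foldl_altStep_one_dropWhile]
  simp only [hw]
  cases hd : v.dropWhile PySem.Chars.isspace with
  | nil => simp
  | cons c rest =>
      have hc : PySem.Chars.isspace c = false :=
        head?_dropWhile_isspace v c (by rw [hd]; rfl)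
      have hh : (c :: rest).headI = c := rfl
      rw [List.foldl_cons, hh]
      by_cases hi : isInd c = true
      · have h2 : altStep 1 c = 2 := by simp [altStep, hc, hi]
        rw [h2, hi, foldl_altStep_two]
        cases rest with
        | nil => simp
        | cons b w =>
            rw [if_pos (show (c :: b :: w).length > 1 by simp only [List.length_cons]; omega)]
            cases hall : (b :: w).all isMod with
            | true => simp [aModLoop_eq, hall]
            | false => simp [aModLoop_eq, hall]
      · have hi' : isInd c = false := by simpa using hi
        have h3 : altStep 1 c = 3 := by simp [altStep, hc, hi']
        rw [h3, foldl_altStep_three, hi']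
        simp

lemma guard_eq (cs : List Char) :
    ((PySem.Chars.strip cs).isEmpty || PySem.Chars.startswith (PySem.Chars.lstrip cs) ['#'])
    = ((PySem.Chars.strip cs).isEmpty || PySem.Chars.startswith (PySem.Chars.strip cs) ['#']) := by
  cases hs : PySem.Chars.strip cs with
  | nil => simp
  | cons c r =>
      have hp : PySem.Chars.strip cs <+: PySem.Chars.lstrip cs := by
        unfold PySem.Chars.strip; exact rstrip_prefix _
      rw [hs] at hp
      obtain ⟨z, hz⟩ := hp
      rw [← hz]
      unfold PySem.Chars.startswith
      simp [List.isPrefixOf]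

theorem block_scalar_header_spec : Claim_equal_block_scalar_header := by
  intro line _
  unfold Spec_block_scalar_header block_scalar_header block_scalar_header_alt
  simp only []
  rw [guard_eq line.toList]
  cases hg : ((PySem.Chars.strip line.toList).isEmpty || PySem.Chars.startswith (PySem.Chars.strip line.toList) ['#']) with
  | true => simp
  | false =>
      simp only [Bool.false_eq_true, if_false]
      set text := PySem.Chars.strip line.toList with htext
      by_cases hmem : ':' ∈ text
      · rw [if_neg (by rw [PySem.Chars.isIn_eq_false_iff]; simp [singleton_infix_iff, hmem])]
        obtain ⟨h1, h2⟩ := split_colon text hmem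
        have hfold : text.foldl altStep 0
            = ((text.dropWhile (· ≠ ':')).drop 1).foldl altStep 1 := by
          conv_lhs => rw [h1]
          rw [List.foldl_append, foldl_altStep_zero _ h2, List.foldl_cons]
          have : altStep 0 ':' = 1 := by simp [altStep]
          rw [this]
        rw [hfold]
        have hvTrail : NoTrailWS ((text.dropWhile (· ≠ ':')).drop 1) := by
          have hall : NoTrailWS text := noTrail_strip line.toList
          have h' : NoTrailWS ((text.takeWhile (· ≠ ':') ++ [':'])
              ++ (text.dropWhile (· ≠ ':')).drop 1) := by
            rw [List.append_assoc, List.singleton_append, ← h1]; exact hall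
          exact noTrail_append _ _ h' 
        exact tail_eq _ hvTrail _
      · rw [if_pos (by rw [PySem.Chars.isIn_eq_false_iff]; simp [singleton_infix_iff, hmem])]
        rw [foldl_altStep_zero _ hmem]
        rfl
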